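-- pv_equiv track=rewrite | github.com/Amaruon/fisrt-project | game.py | define_winning_options
-- ===== SOURCE A (Python) =====
-- def define_winning_options(user_list):
--     winning_list = {}
--     number_of_combinations = [*range(0, len(user_list) // 2)]
--     for choice in user_list:
--         winning_list[choice] = []
--         for n in number_of_combinations:
--             index_for_element = user_list.index(choice) + 1 + n
--             if index_for_element >= (len(user_list)):
--                 winning_list[choice].append(user_list[index_for_element - len(user_list)])
--             else:
--                 winning_list[choice].append(user_list[index_for_element])
--     return winning_list
-- ===== SOURCE B (Python) =====
-- def define_winning_options(user_list):
--     half = len(user_list) // 2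
--     doubled = user_list * 2
--     winning_list = {}
--     for i, choice in enumerate(user_list):
--         if choice not in winning_list:
--             winning_list[choice] = doubled[i + 1 : i + 1 + half]
--     return winning_list
-- ===== Notes on version B (the rewrite author's own statement) =====
-- stated objective: simpler
-- what changed: B replaces A's per-element inner loop with its modular index arithmetic and repeated list.index calls by one enumerate pass that skips already-seen elements and takes a single slice of a doubled list (user_list*2), which supplies the wrap-around for free.
import Mathlib
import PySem

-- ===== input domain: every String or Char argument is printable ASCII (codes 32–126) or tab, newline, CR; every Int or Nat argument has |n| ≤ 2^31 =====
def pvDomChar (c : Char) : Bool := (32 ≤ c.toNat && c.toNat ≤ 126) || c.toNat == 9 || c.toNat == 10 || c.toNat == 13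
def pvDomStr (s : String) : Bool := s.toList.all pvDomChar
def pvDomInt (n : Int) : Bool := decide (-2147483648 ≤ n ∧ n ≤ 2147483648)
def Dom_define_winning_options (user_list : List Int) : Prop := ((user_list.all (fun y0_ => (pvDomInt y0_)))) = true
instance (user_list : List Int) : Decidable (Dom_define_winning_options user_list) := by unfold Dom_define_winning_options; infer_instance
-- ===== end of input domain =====

-- B builds each value with one slice of the doubled list instead of A's inner loop of modular index
-- arithmetic with repeated list.index scans (objective: simpler).

-- ===== PORT A =====
-- literal port of A; `(PySem.List.index? …).getD 0` is exact because `choice` is always a member of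
-- `user_list` (so .index never raises), and `pyGetD … 0` is exact because the computed index is
-- always in range (0 ≤ index < len after the wrap branch), so Python never raises here: A is total.
def define_winning_options (user_list : List Int) : List (Int × List Int) :=
  let number_of_combinations := PySem.List.pyRange 0 (PySem.Int.floordiv (user_list.length : Int) 2)
  (user_list.foldl
    (fun (winning_list : PySem.Dict Int (List Int)) choice =>
      number_of_combinations.foldl
        (fun (w : PySem.Dict Int (List Int)) n =>
          let index_for_element : Int :=
            (((PySem.List.index? user_list choice).getD 0 : Nat) : Int) + 1 + n
          if index_for_element ≥ (user_list.length : Int) then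
            w.modify choice [] (fun v => v ++ [PySem.List.pyGetD user_list (index_for_element - (user_list.length : Int)) 0])
          else
            w.modify choice [] (fun v => v ++ [PySem.List.pyGetD user_list index_for_element 0]))
        (winning_list.insert choice []))
    PySem.Dict.empty).items

-- ===== PORT B =====
def define_winning_options_alt (user_list : List Int) : List (Int × List Int) :=
  let half := PySem.Int.floordiv (user_list.length : Int) 2
  let doubled := PySem.List.pyRepeat user_list 2
  ((user_list.zipIdx.foldl
    (fun (winning_list : PySem.Dict Int (List Int)) p =>
      if winning_list.contains p.1 then winning_list
      else winning_list.insert p.1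
        (PySem.List.slice doubled (some ((p.2 : Int) + 1)) (some ((p.2 : Int) + 1 + half))))
    PySem.Dict.empty)).items

-- ===== PRECONDITION & SPEC =====
def Spec_define_winning_options (user_list : List Int) (out : List (Int × List Int)) : Prop := out = define_winning_options_alt user_list
instance (user_list : List Int) (out : List (Int × List Int)) : Decidable (Spec_define_winning_options user_list out) := by unfold Spec_define_winning_options; infer_instance

-- ===== CLAIM (what is proved, stated in full; the proofs are below) =====
def Claim_equal_define_winning_options : Prop := ∀ (user_list : List Int), Dom_define_winning_options user_list → Spec_define_winning_options user_list (define_winning_options user_list)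

-- ===== LEMMAS AND PROOFS =====

-- the value both programs associate with the element whose first occurrence is at index i
def dwoVal (xs : List Int) (i : Nat) : List Int :=
  ((xs ++ xs).drop (i + 1)).take (xs.length / 2)

-- inserting a key with the value it already has leaves the dict unchanged
theorem dwo_insert_eq_self {κ ν : Type} [BEq κ] [LawfulBEq κ] (d : PySem.Dict κ ν) (k : κ) (v : ν)
    (hnd : d.keys.Nodup) (h : d.get? k = some v) : d.insert k v = d := by
  have hc : d.contains k = true := by
    rw [PySem.Dict.contains_eq_isSome_get?, h]; rfl
  apply PySem.Dict.ext
  rw [PySem.Dict.items_insert_of_contains d v hc]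
  have hcg : ∀ p ∈ d.items, (if (p.1 == k) = true then (k, v) else p) = p := by
    intro p hp
    by_cases hpk : p.1 = k
    · have hgp : d.get? p.1 = some p.2 :=
        (PySem.Dict.get?_eq_some_iff_mem_items d p.1 p.2 hnd).mpr (by simpa using hp)
      rw [hpk, h] at hgp
      have hv2 : v = p.2 := Option.some.inj hgp
      simp only [hpk, beq_self_eq_true, if_true]
      rw [hv2, ← hpk]
    · simp [hpk]
  rw [List.map_congr_left hcg]
  simp

-- the inner append loop on the entry of key c is one insert of the mapped list
theorem dwo_modify_loop {κ : Type} [BEq κ] [LawfulBEq κ] (l : List Int)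
    (d : PySem.Dict κ (List Int)) (c : κ) (g : Int → Int) :
    ∀ v, l.foldl (fun w n => w.modify c [] (fun s => s ++ [g n])) (d.insert c v)
      = d.insert c (v ++ l.map g) := by
  induction l with
  | nil => intro v; simp
  | cons n t ih =>
    intro v
    have hstep : (d.insert c v).modify c [] (fun s => s ++ [g n]) = d.insert c (v ++ [g n]) := by
      simp [PySem.Dict.modify, PySem.Dict.getD_insert_self, PySem.Dict.insert_insert_self]
    simp only [List.foldl_cons, List.map_cons, hstep, ih]
    simp

-- first index of a member is in range
theorem dwo_idx_lt (xs : List Int) (c : Int) (hc : c ∈ xs) :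
    (PySem.List.index? xs c).getD 0 < xs.length := by
  induction xs with
  | nil => cases hc
  | cons a t ih =>
    simp only [PySem.List.index?, List.idxOf?, List.findIdx?_cons]
    by_cases hac : (a == c) = true
    · simp [hac]
    · have hct : c ∈ t := by
        rcases List.mem_cons.mp hc with h | h
        · exact absurd (by simp [h]) hac
        · exact h
      have hlt := ih hct
      simp only [PySem.List.index?, List.idxOf?] at hlt
      rw [if_neg hac]
      cases hfi : List.findIdx? (fun b => b == c) t with
      | none => simp
      | some j =>
        rw [hfi] at hlt
        simp only [Option.map_some, Option.getD_some] at hlt ⊢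
        simp only [List.length_cons]
        omega

-- first index of an element not occurring earlier
theorem dwo_idx_append (pre suf : List Int) (x : Int) (hx : x ∉ pre) :
    PySem.List.index? (pre ++ x :: suf) x = some pre.length := by
  induction pre with
  | nil => simp [PySem.List.index?, List.idxOf?, List.findIdx?_cons]
  | cons a t ih =>
    have hax : (a == x) = false := by
      simp only [beq_eq_false_iff_ne, ne_eq]
      intro h; exact hx (by simp [h])
    have hxt : x ∉ t := fun h => hx (List.mem_cons_of_mem a h)
    have htl := ih hxt
    simp only [PySem.List.index?, List.idxOf?] at htl ⊢
    simp [List.cons_append, List.findIdx?_cons, hax, htl]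

-- A's inner loop values, mapped over range(len//2), are the slice of the doubled list
theorem dwo_mapF (xs : List Int) (i : Nat) (hi : i < xs.length) :
    (PySem.List.pyRange 0 (PySem.Int.floordiv (xs.length : Int) 2)).map
      (fun n => if ((i : Int) + 1 + n ≥ (xs.length : Int)) then
          PySem.List.pyGetD xs ((i : Int) + 1 + n - (xs.length : Int)) 0
        else PySem.List.pyGetD xs ((i : Int) + 1 + n) 0)
    = dwoVal xs i := by
  have h2 : PySem.Int.floordiv (xs.length : Int) 2 = ((xs.length / 2 : Nat) : Int) := by
    exact_mod_cast PySem.Int.floordiv_natCast xs.length 2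
  rw [h2, PySem.List.pyRange_zero_natCast, List.map_map]
  apply List.ext_getElem
  · simp [dwoVal]
    omega
  · intro t ht1 ht2
    simp only [List.getElem_map, List.getElem_range, Function.comp_apply]
    simp only [List.length_map, List.length_range] at ht1
    have hlen : xs.length / 2 ≤ xs.length := by omega
    simp only [dwoVal, List.getElem_take, List.getElem_drop]
    by_cases hge : (i : Int) + 1 + (t : Int) ≥ (xs.length : Int)
    · rw [if_pos hge]
      have hcast : (i : Int) + 1 + (t : Int) - (xs.length : Int) = ((i + 1 + t - xs.length : Nat) : Int) := by
        omega
      rw [hcast, PySem.List.pyGetD_natCast]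
      have hb : i + 1 + t - xs.length < xs.length := by omega
      rw [List.getD_eq_getElem xs 0 hb]
      rw [List.getElem_append_right (by omega)]
    · rw [if_neg hge]
      have hcast : (i : Int) + 1 + (t : Int) = ((i + 1 + t : Nat) : Int) := by push_cast; ring
      rw [hcast, PySem.List.pyGetD_natCast]
      have hb : i + 1 + t < xs.length := by omega
      rw [List.getD_eq_getElem xs 0 hb]
      rw [List.getElem_append_left hb]

-- A is the fold that inserts dwoVal at the first index of each element
theorem dwo_A_eq (xs : List Int) :
    define_winning_options xs
      = (xs.foldl (fun d c => d.insert c (dwoVal xs ((PySem.List.index? xs c).getD 0)))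
          PySem.Dict.empty).items := by
  have hA : define_winning_options xs
      = (xs.foldl
          (fun (winning_list : PySem.Dict Int (List Int)) choice =>
            (PySem.List.pyRange 0 (PySem.Int.floordiv (xs.length : Int) 2)).foldl
              (fun w n =>
                if (((PySem.List.index? xs choice).getD 0 : Nat) : Int) + 1 + n ≥ (xs.length : Int) then
                  w.modify choice [] (fun v => v ++ [PySem.List.pyGetD xs ((((PySem.List.index? xs choice).getD 0 : Nat) : Int) + 1 + n - (xs.length : Int)) 0])
                else
                  w.modify choice [] (fun v => v ++ [PySem.List.pyGetD xs ((((PySem.List.index? xs choice).getD 0 : Nat) : Int) + 1 + n) 0]))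
              (winning_list.insert choice []))
          PySem.Dict.empty).items := rfl
  rw [hA]
  congr 1
  apply PySem.List.foldl_congr_mem
  intro acc c hc
  have hstep : ∀ (w : PySem.Dict Int (List Int)) (n : Int),
      (if (((PySem.List.index? xs c).getD 0 : Nat) : Int) + 1 + n ≥ (xs.length : Int) then
        w.modify c [] (fun v => v ++ [PySem.List.pyGetD xs ((((PySem.List.index? xs c).getD 0 : Nat) : Int) + 1 + n - (xs.length : Int)) 0])
      else
        w.modify c [] (fun v => v ++ [PySem.List.pyGetD xs ((((PySem.List.index? xs c).getD 0 : Nat) : Int) + 1 + n) 0]))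
      = w.modify c [] (fun v => v ++
          [if (((PySem.List.index? xs c).getD 0 : Nat) : Int) + 1 + n ≥ (xs.length : Int) then
             PySem.List.pyGetD xs ((((PySem.List.index? xs c).getD 0 : Nat) : Int) + 1 + n - (xs.length : Int)) 0
           else PySem.List.pyGetD xs ((((PySem.List.index? xs c).getD 0 : Nat) : Int) + 1 + n) 0]) := by
    intro w n
    split_ifs <;> rfl
  rw [PySem.List.foldl_congr_mem _ _ _ _ (fun w n _ => hstep w n)]
  rw [dwo_modify_loop]
  rw [List.nil_append]
  rw [dwo_mapF xs _ (dwo_idx_lt xs c hc)]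

-- B's slice is dwoVal
theorem dwo_B_val (xs : List Int) (i : Nat) :
    PySem.List.slice (PySem.List.pyRepeat xs 2) (some ((i : Nat) + 1 : Int))
      (some (((i : Nat) : Int) + 1 + PySem.Int.floordiv (xs.length : Int) 2)) = dwoVal xs i := by
  have h2 : PySem.Int.floordiv (xs.length : Int) 2 = ((xs.length / 2 : Nat) : Int) := by
    exact_mod_cast PySem.Int.floordiv_natCast xs.length 2
  have hrep : PySem.List.pyRepeat xs 2 = xs ++ xs := by simp [PySem.List.pyRepeat]
  have hcast : ((i : Nat) : Int) + 1 = ((i + 1 : Nat) : Int) := by push_cast; ring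
  rw [h2, hrep, hcast, PySem.List.slice_natCast_add]
  rfl

-- main induction: A's insert fold and B's skip-seen fold agree from any dict satisfying the invariant
theorem dwo_main (xs : List Int) (suf : List Int) :
    ∀ (pre : List Int) (d : PySem.Dict Int (List Int)),
    xs = pre ++ suf → d.keys.Nodup →
    (∀ k, d.contains k = true ↔ k ∈ pre) →
    (∀ k, k ∈ pre → d.get? k = some (dwoVal xs ((PySem.List.index? xs k).getD 0))) →
    suf.foldl (fun d c => d.insert c (dwoVal xs ((PySem.List.index? xs c).getD 0))) d
      = (suf.zipIdx pre.length).foldl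
          (fun w p => if w.contains p.1 then w
            else w.insert p.1 (PySem.List.slice (PySem.List.pyRepeat xs 2)
              (some ((p.2 : Int) + 1))
              (some ((p.2 : Int) + 1 + PySem.Int.floordiv (xs.length : Int) 2)))) d := by
  induction suf with
  | nil => intro pre d _ _ _ _; simp
  | cons x t ih =>
    intro pre d hx hnd hc hg
    simp only [List.foldl_cons, List.zipIdx_cons]
    by_cases hxp : x ∈ pre
    · have hcx : d.contains x = true := (hc x).mpr hxp
      rw [dwo_insert_eq_self d x _ hnd (hg x hxp), if_pos hcx]
      have hx' : xs = (pre ++ [x]) ++ t := by simpa using hx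
      have hlen : (pre ++ [x]).length = pre.length + 1 := by simp
      have hc' : ∀ k, d.contains k = true ↔ k ∈ pre ++ [x] := by
        intro k
        rw [hc k]
        constructor
        · intro h; exact List.mem_append_left _ h
        · intro h
          rcases List.mem_append.mp h with h | h
          · exact h
          · simp at h; subst h; exact hxp
      have hg' : ∀ k, k ∈ pre ++ [x] → d.get? k = some (dwoVal xs ((PySem.List.index? xs k).getD 0)) := by
        intro k hk
        rcases List.mem_append.mp hk with h | h
        · exact hg k h
        · simp at h; subst h; exact hg _ hxp
      have := ih (pre ++ [x]) d hx' hnd hc' hg'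
      rwa [hlen] at this
    · have hcx : d.contains x = false := by
        cases h : d.contains x
        · rfl
        · exact absurd ((hc x).mp h) hxp
      rw [if_neg (by simp [hcx])]
      have hidx : PySem.List.index? xs x = some pre.length := by
        rw [hx]; exact dwo_idx_append pre t x hxp
      have hval : dwoVal xs ((PySem.List.index? xs x).getD 0) = dwoVal xs pre.length := by
        rw [hidx]; rfl
      have hslice : PySem.List.slice (PySem.List.pyRepeat xs 2)
          (some ((pre.length : Int) + 1))
          (some ((pre.length : Int) + 1 + PySem.Int.floordiv (xs.length : Int) 2))
          = dwoVal xs pre.length := dwo_B_val xs pre.length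
      rw [hval, ← hslice]
      set v := PySem.List.slice (PySem.List.pyRepeat xs 2)
          (some ((pre.length : Int) + 1))
          (some ((pre.length : Int) + 1 + PySem.Int.floordiv (xs.length : Int) 2)) with hv
      have hx' : xs = (pre ++ [x]) ++ t := by simpa using hx
      have hlen : (pre ++ [x]).length = pre.length + 1 := by simp
      have hnd' : (d.insert x v).keys.Nodup := PySem.Dict.nodup_keys_insert d x v hnd
      have hc' : ∀ k, (d.insert x v).contains k = true ↔ k ∈ pre ++ [x] := by
        intro k
        rw [PySem.Dict.contains_insert]
        simp only [List.mem_append, List.mem_singleton, Bool.or_eq_true, beq_iff_eq]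
        rw [hc k]
        tauto
      have hg' : ∀ k, k ∈ pre ++ [x] → (d.insert x v).get? k = some (dwoVal xs ((PySem.List.index? xs k).getD 0)) := by
        intro k hk
        rcases List.mem_append.mp hk with h | h
        · have hne : k ≠ x := fun he => hxp (he ▸ h)
          rw [PySem.Dict.get?_insert_of_ne _ _ hne]
          exact hg k h
        · simp at h; subst h
          rw [PySem.Dict.get?_insert_self, hval, hslice]
      have := ih (pre ++ [x]) (d.insert x v) hx' hnd' hc' hg'
      rwa [hlen] at this

-- B unfolded (zeta-reduced form)
theorem dwo_B_eq (xs : List Int) :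
    define_winning_options_alt xs
      = ((xs.zipIdx 0).foldl
          (fun w p => if w.contains p.1 then w
            else w.insert p.1 (PySem.List.slice (PySem.List.pyRepeat xs 2)
              (some ((p.2 : Int) + 1))
              (some ((p.2 : Int) + 1 + PySem.Int.floordiv (xs.length : Int) 2)))) PySem.Dict.empty).items := rfl

-- ===== VERDICT (by name: the statement is the Claim_ definition above) =====
theorem define_winning_options_spec : Claim_equal_define_winning_options := by
  intro xs _
  show define_winning_options xs = define_winning_options_alt xs
  rw [dwo_A_eq, dwo_B_eq]
  congr 1
  have := dwo_main xs xs [] PySem.Dict.empty (by simp) PySem.Dict.nodup_keys_empty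
    (by intro k; simp [PySem.Dict.contains_empty]) (by intro k hk; cases hk)
  simpa using this
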